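-- pv_equiv track=rewrite | github.com/Mflavien01/GraphRAG-Hallucination-Analysis | task1_questions_generation/generate_llm.py | has_connected_multihop
-- ===== SOURCE A (Python) =====
-- def has_connected_multihop(triples):
--     """Return True if at least 2 triples are connected through a shared entity."""
--     if len(triples) < 2:
--         return False
--
--     nodes_per_triple = []
--     for t in triples:
--         sub = str(t.get("sub", "")).strip()
--         obj = str(t.get("obj", "")).strip()
--         nodes_per_triple.append({sub, obj})
--
--     for i in range(len(nodes_per_triple)):
--         for j in range(i + 1, len(nodes_per_triple)):
--             if nodes_per_triple[i] & nodes_per_triple[j]: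
--                 return True
--     return False
-- ===== SOURCE B (Python) =====
-- def has_connected_multihop(triples):
--     """Return True if at least 2 triples are connected through a shared entity."""
--     seen = set()
--     for t in triples:
--         sub = str(t.get("sub", "")).strip()
--         obj = str(t.get("obj", "")).strip()
--         for node in {sub, obj}:
--             if node in seen:
--                 return True
--             seen.add(node)
--     return False
-- ===== Notes on version B (the rewrite author's own statement) =====
-- stated objective: alternative
-- what changed: Replaces the quadratic pairwise node-set intersection scan with a single pass over the triples that maintains one 'seen entity' set and answers True as soon as any triple's (deduplicated) node reoccurs.
import Mathlib
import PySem

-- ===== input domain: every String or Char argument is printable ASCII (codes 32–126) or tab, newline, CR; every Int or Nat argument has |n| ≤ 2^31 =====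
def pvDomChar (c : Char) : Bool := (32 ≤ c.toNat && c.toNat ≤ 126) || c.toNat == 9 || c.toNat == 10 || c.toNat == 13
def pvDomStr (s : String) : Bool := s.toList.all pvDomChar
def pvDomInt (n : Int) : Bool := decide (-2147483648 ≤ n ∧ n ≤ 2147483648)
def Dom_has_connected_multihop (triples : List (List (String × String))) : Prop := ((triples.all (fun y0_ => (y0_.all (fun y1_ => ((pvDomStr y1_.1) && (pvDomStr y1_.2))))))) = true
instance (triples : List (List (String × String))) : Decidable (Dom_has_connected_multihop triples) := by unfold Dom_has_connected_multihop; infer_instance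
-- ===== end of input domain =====

-- B replaces A's pairwise node-set intersection scan by a single pass over the
-- triples that maintains one 'seen entity' set and answers True on the first repeat.


-- ===== PORT A =====
-- the nested 'for i … for j in range(i+1, …)' early-return scan, as structural recursion:
-- each element is intersected with every later one
def pvPairLoop : List (PySem.Set String) → Bool
  | [] => false
  | s :: rest => rest.any (fun s' => !(PySem.Set.inter s s').isEmpty) || pvPairLoop rest

def has_connected_multihop (triples : List (List (String × String))) : Bool :=
  if triples.length < 2 then false
  else
    let nodes_per_triple := triples.map (fun t =>
      let sub := PySem.Str.strip ((PySem.Dict.mk t).getD "sub" "")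
      let obj := PySem.Str.strip ((PySem.Dict.mk t).getD "obj" "")
      PySem.Set.ofList [sub, obj])
    pvPairLoop nodes_per_triple

-- ===== PORT B =====
-- the inner 'for node in {sub, obj}' loop: none = early 'return True', some = the updated seen set
def pvInner (seen : PySem.Set String) : List String → Option (PySem.Set String)
  | [] => some seen
  | n :: ns => if PySem.Set.contains seen n then none else pvInner (PySem.Set.add seen n) ns

def pvScan (seen : PySem.Set String) : List (List (String × String)) → Bool
  | [] => false
  | t :: rest =>
    let sub := PySem.Str.strip ((PySem.Dict.mk t).getD "sub" "")
    let obj := PySem.Str.strip ((PySem.Dict.mk t).getD "obj" "")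
    match pvInner seen (PySem.Set.ofList [sub, obj]) with
    | none => true
    | some seen' => pvScan seen' rest

def has_connected_multihop_alt (triples : List (List (String × String))) : Bool :=
  pvScan PySem.Set.empty triples

-- ===== PRECONDITION & SPEC =====
def Spec_has_connected_multihop (triples : List (List (String × String))) (out : Bool) : Prop := out = has_connected_multihop_alt triples
instance (triples : List (List (String × String))) (out : Bool) : Decidable (Spec_has_connected_multihop triples out) := by unfold Spec_has_connected_multihop; infer_instance

-- ===== CLAIM (what is proved, stated in full; the proofs are below) =====
def Claim_equal_has_connected_multihop : Prop := ∀ (triples : List (List (String × String))), Dom_has_connected_multihop triples → Spec_has_connected_multihop triples (has_connected_multihop triples)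

-- ===== LEMMAS AND PROOFS =====

-- the node set of one triple (proof-side abbreviation; both ports compute exactly this)
def pvNodes (t : List (String × String)) : PySem.Set String :=
  PySem.Set.ofList [PySem.Str.strip ((PySem.Dict.mk t).getD "sub" ""),
                    PySem.Str.strip ((PySem.Dict.mk t).getD "obj" "")]

lemma pvInner_eq (ls : List String) (seen : PySem.Set String) (h : ls.Nodup) :
    pvInner seen ls =
      if ls.any (fun n => PySem.Set.contains seen n) then none
      else some (PySem.Set.update seen ls) := by
  induction ls generalizing seen with
  | nil => simp [pvInner, PySem.Set.update]
  | cons n ns ih =>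
    simp only [List.nodup_cons] at h
    cases hcb : PySem.Set.contains seen n with
    | true =>
      simp only [pvInner, List.any_cons, hcb, Bool.true_or, if_true]
    | false =>
      simp only [pvInner, List.any_cons, hcb, Bool.false_or, Bool.false_eq_true, if_false]
      rw [ih _ h.2]
      have hany : ns.any (fun m => PySem.Set.contains (PySem.Set.add seen n) m)
          = ns.any (fun m => PySem.Set.contains seen m) := by
        refine Bool.eq_iff_iff.mpr ?_
        simp only [List.any_eq_true, PySem.Set.contains_eq_listContains,
          List.contains_iff_mem, PySem.Set.mem_add]
        constructor
        · rintro ⟨m, hm, hmem | rfl⟩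
          · exact ⟨m, hm, hmem⟩
          · exact absurd hm h.1
        · rintro ⟨m, hm, hmem⟩
          exact ⟨m, hm, Or.inl hmem⟩
      rw [hany, PySem.Set.update_cons]

lemma pvInterNonempty (s t : PySem.Set String) :
    ((!(PySem.Set.inter s t).isEmpty) = true) ↔ ∃ n ∈ s, n ∈ t := by
  simp only [Bool.not_eq_true', List.isEmpty_eq_false_iff_exists_mem]
  constructor
  · rintro ⟨n, hn⟩
    rcases (PySem.Set.mem_inter ..).1 hn with ⟨h1, h2⟩
    exact ⟨n, h1, h2⟩
  · rintro ⟨n, h1, h2⟩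
    exact ⟨n, (PySem.Set.mem_inter ..).2 ⟨h1, h2⟩⟩

lemma pvScan_eq (ts : List (List (String × String))) (seen : PySem.Set String) :
    pvScan seen ts =
      (pvPairLoop (ts.map pvNodes)
        || (ts.map pvNodes).any (fun s => s.any (fun n => PySem.Set.contains seen n))) := by
  induction ts generalizing seen with
  | nil => simp [pvScan, pvPairLoop]
  | cons t rest ih =>
    simp only [pvScan]
    rw [pvInner_eq _ _ (PySem.Set.nodup_ofList ..)]
    simp only [List.map_cons, pvPairLoop, List.any_cons, pvNodes]
    split_ifs with hhit
    · simp only [hhit, Bool.true_or, Bool.or_true]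
    · show pvScan _ rest = _
      rw [ih]
      refine Bool.eq_iff_iff.mpr ?_
      simp only [Bool.or_eq_true, List.any_eq_true, List.mem_map,
        PySem.Set.contains_eq_listContains, List.contains_iff_mem,
        PySem.Set.mem_update, pvInterNonempty]
      simp only [List.any_eq_true, PySem.Set.contains_eq_listContains,
        List.contains_iff_mem] at hhit
      constructor
      · rintro (h | ⟨x, hx, y, hy, (h1 | h1)⟩)
        · exact Or.inl (Or.inr h)
        · exact Or.inr (Or.inr ⟨x, hx, y, hy, h1⟩)
        · exact Or.inl (Or.inl ⟨x, hx, y, h1, hy⟩)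
      · rintro ((⟨x, hx, n, hn, hnx⟩ | h) | (⟨n, hn, hns⟩ | ⟨x, hx, y, hy, h1⟩))
        · exact Or.inr ⟨x, hx, n, hnx, Or.inr hn⟩
        · exact Or.inl h
        · exact absurd ⟨n, hn, hns⟩ hhit
        · exact Or.inr ⟨x, hx, y, hy, Or.inl h1⟩

-- ===== VERDICT (by name: the statement is the Claim_ definition above) =====
theorem has_connected_multihop_spec : Claim_equal_has_connected_multihop := by
  intro triples _
  show has_connected_multihop triples = has_connected_multihop_alt triples
  unfold has_connected_multihop has_connected_multihop_alt
  rw [pvScan_eq]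
  have hseen : ∀ l : List (PySem.Set String),
      l.any (fun s => s.any (fun n => PySem.Set.contains PySem.Set.empty n)) = false := by
    intro l
    simp [PySem.Set.empty, PySem.Set.contains_eq_listContains]
  rw [hseen, Bool.or_false]
  split_ifs with h
  · match triples, h with
    | [], _ => rfl
    | [t], _ => simp [pvPairLoop]
    | _ :: _ :: _, h => simp at h
  · rfl
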